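-- pv_equiv track=rewrite | github.com/ksparkje/leetcode-practice | python/array/q_monotonic.py | monotonic_increasing
-- ===== SOURCE A (Python) =====
-- def monotonic_increasing(given_array):
--     # stack with (index, item)
--     increasing = []
--
--     length = len(given_array)
--     first_smaller_on_left = [-1] * length
--     first_smaller_on_right = [-1] * length
--
--     for idx, item in enumerate(given_array):
--         while increasing and increasing[-1][1] >= item:
--             # Queue with (index, item)
--             first_smaller_on_right[increasing.pop()[0]] = item
--
--         if increasing:
--             # current item is not in the queue yet
--             first_smaller_on_left[idx] = increasing[-1][1]
--
--         increasing.append([idx, item])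
--
--     return first_smaller_on_left, first_smaller_on_right
-- ===== SOURCE B (Python) =====
-- def monotonic_increasing(given_array):
--     n = len(given_array)
--     # left_idx[i]: index of nearest j < i with given_array[j] < given_array[i], else -1;
--     # found by jumping along earlier left_idx links instead of scanning or keeping a stack.
--     left_idx = []
--     for i in range(n):
--         j = i - 1
--         while j >= 0 and given_array[j] >= given_array[i]:
--             j = left_idx[j]
--         left_idx.append(j)
--     # right_idx[i]: index of nearest j > i with given_array[j] <= given_array[i], else n.
--     right_idx = [n] * n
--     for i in range(n - 1, -1, -1):
--         j = i + 1
--         while j < n and given_array[j] > given_array[i]: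
--             j = right_idx[j]
--         right_idx[i] = j
--     left = [given_array[j] if j >= 0 else -1 for j in left_idx]
--     right = [given_array[j] if j < n else -1 for j in right_idx]
--     return left, right
-- ===== Notes on version B (the rewrite author's own statement) =====
-- stated objective: alternative
-- what changed: Replaced A's single-pass monotonic stack (popping entries to fill right-neighbour slots) by two directional passes that build nearest-smaller index tables, finding each index's neighbour by jumping along previously computed links instead of maintaining a stack.
import Mathlib
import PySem

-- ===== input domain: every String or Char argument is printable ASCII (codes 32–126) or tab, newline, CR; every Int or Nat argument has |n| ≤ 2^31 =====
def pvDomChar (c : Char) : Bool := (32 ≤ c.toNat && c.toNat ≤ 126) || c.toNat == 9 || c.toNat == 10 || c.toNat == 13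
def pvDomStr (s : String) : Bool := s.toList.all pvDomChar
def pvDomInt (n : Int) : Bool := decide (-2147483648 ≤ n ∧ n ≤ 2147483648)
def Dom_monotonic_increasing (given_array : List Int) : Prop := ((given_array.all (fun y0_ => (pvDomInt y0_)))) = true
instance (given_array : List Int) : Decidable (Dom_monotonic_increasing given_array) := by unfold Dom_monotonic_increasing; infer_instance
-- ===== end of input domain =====

-- B replaces A's monotonic stack by nearest-smaller index tables computed via link-jumping (two directional passes, no stack); return values are proved equal.

-- ===== PORT A =====
-- A's inner while loop: pop stack entries (index, value) with value ≥ item, writing item into right[index].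
def popPhase (item : Int) : List (Nat × Int) → List Int → List (Nat × Int) × List Int
  | [], right => ([], right)
  | (j, v) :: rest, right =>
      if item ≤ v then popPhase item rest (right.set j item)
      else ((j, v) :: rest, right)

-- A's main for loop over (idx, item); the stack keeps the most recent element at the head.
def aGo : List Int → Nat → List (Nat × Int) → List Int → List Int → List Int × List Int
  | [], _, _, left, right => (left, right)
  | item :: xs, idx, stack, left, right =>
      let pr := popPhase item stack right
      let left' := match pr.1 with
        | [] => left
        | (_, v) :: _ => left.set idx v
      aGo xs (idx + 1) ((idx, item) :: pr.1) left' pr.2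

def monotonic_increasing (given_array : List Int) : List Int × List Int :=
  aGo given_array 0 [] (List.replicate given_array.length (-1))
    (List.replicate given_array.length (-1))

-- ===== PORT B =====
-- B's inner while loops: jump j along the already-computed nearest-smaller links.
def jumpLeft (arr : List Int) (x : Int) (tbl : List Int) : Nat → Int → Int
  | 0, j => j
  | fuel + 1, j =>
      if 0 ≤ j ∧ x ≤ arr.getD j.toNat 0 then jumpLeft arr x tbl fuel (tbl.getD j.toNat 0)
      else j

-- B's first for loop: left_idx built by appending (fuel i+1 bounds the ≤ i jumps; totality guard only)
def buildLeft (arr : List Int) : Nat → List Int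
  | 0 => []
  | i + 1 =>
      let tbl := buildLeft arr i
      tbl ++ [jumpLeft arr (arr.getD i 0) tbl (i + 1) ((i : Int) - 1)]

def jumpRight (arr : List Int) (n : Nat) (x : Int) (tbl : List Int) : Nat → Int → Int
  | 0, j => j
  | fuel + 1, j =>
      if j < (n : Int) ∧ x < arr.getD j.toNat 0 then jumpRight arr n x tbl fuel (tbl.getD j.toNat 0)
      else j

-- B's second for loop: i = n-1 down to 0, right_idx[i] := jump result (fuel n-i is a totality guard)
def buildRight (arr : List Int) (n : Nat) : Nat → List Int → List Int
  | 0, tbl => tbl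
  | i + 1, tbl =>
      buildRight arr n i (tbl.set i (jumpRight arr n (arr.getD i 0) tbl (n - i) ((i : Int) + 1)))

def monotonic_increasing_alt (given_array : List Int) : List Int × List Int :=
  let n := given_array.length
  let lidx := buildLeft given_array n
  let ridx := buildRight given_array n n (List.replicate n (n : Int))
  (lidx.map (fun j => if 0 ≤ j then given_array.getD j.toNat 0 else -1),
   ridx.map (fun j => if j < (n : Int) then given_array.getD j.toNat 0 else -1))

-- ===== PRECONDITION & SPEC =====
def Spec_monotonic_increasing (given_array : List Int) (out : List Int × List Int) : Prop := out = monotonic_increasing_alt given_array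
instance (given_array : List Int) (out : List Int × List Int) : Decidable (Spec_monotonic_increasing given_array out) := by unfold Spec_monotonic_increasing; infer_instance

-- ===== CLAIM (what is proved, stated in full; the proofs are below) =====
def Claim_equal_monotonic_increasing : Prop := ∀ (given_array : List Int), Dom_monotonic_increasing given_array → Spec_monotonic_increasing given_array (monotonic_increasing given_array)

-- ===== LEMMAS AND PROOFS =====

-- proof-level middle ground: the per-index scan specification both ports are reduced to
-- first element of the list that is < x (resp. ≤ x); -1 when none — B's inner scans.
def firstLt (x : Int) : List Int → Int
  | [] => -1
  | v :: rest => if v < x then v else firstLt x rest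

def firstLe (x : Int) : List Int → Int
  | [] => -1
  | v :: rest => if v ≤ x then v else firstLe x rest

-- scan j = i-1 .. 0 for the first value < arr[i]
def leftSpec (arr : List Int) (i : Nat) : Int := firstLt (arr.getD i 0) ((arr.take i).reverse)
-- scan j = i+1 .. n-1 for the first value ≤ arr[i]
def rightSpec (arr : List Int) (i : Nat) : Int := firstLe (arr.getD i 0) (arr.drop (i + 1))


-- arr[j] as the loop sees it (always in range where used)
def gv (arr : List Int) (j : Nat) : Int := arr.getD j 0

-- j survives on the stack after processing arr[0..idx-1]
def candB (arr : List Int) (idx j : Nat) : Bool :=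
  (List.range idx).all fun k => if j < k then decide (gv arr j < gv arr k) else true

lemma candB_iff (arr : List Int) (idx j : Nat) :
    candB arr idx j = true ↔ ∀ k, j < k → k < idx → gv arr j < gv arr k := by
  simp only [candB, List.all_eq_true, List.mem_range]
  constructor
  · intro h k hjk hk; have := h k hk; simpa [hjk] using this
  · intro h k hk; by_cases hjk : j < k <;> simp [hjk]
    exact h k hjk hk
  
-- the exact stack contents after processing arr[0..idx-1] (head = most recent)
def stackSpec (arr : List Int) (idx : Nat) : List (Nat × Int) :=
  (((List.range idx).filter (candB arr idx)).reverse).map fun j => (j, gv arr j)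

def leftList (arr : List Int) (idx : Nat) : List Int :=
  (List.range arr.length).map fun i => if i < idx then leftSpec arr i else -1

def rightList (arr : List Int) (idx : Nat) : List Int :=
  (List.range arr.length).map fun j =>
    if j < idx ∧ ¬ candB arr idx j = true then rightSpec arr j else -1

-- dropped/popped elements are invisible to the scans
lemma firstLt_append (x : Int) (l1 l2 : List Int) (h : ∀ v ∈ l1, ¬ v < x) :
    firstLt x (l1 ++ l2) = firstLt x l2 := by
  induction l1 with
  | nil => rfl
  | cons a t ih =>
      simp only [List.cons_append, firstLt]
      rw [if_neg (h a (by simp))]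
      exact ih fun v hv => h v (by simp [hv])

lemma firstLe_append (x : Int) (l1 l2 : List Int) (h : ∀ v ∈ l1, ¬ v ≤ x) :
    firstLe x (l1 ++ l2) = firstLe x l2 := by
  induction l1 with
  | nil => rfl
  | cons a t ih =>
      simp only [List.cons_append, firstLe]
      rw [if_neg (h a (by simp))]
      exact ih fun v hv => h v (by simp [hv])

lemma firstLe_neg_one (x : Int) (l : List Int) (h : ∀ v ∈ l, ¬ v ≤ x) :
    firstLe x l = -1 := by
  induction l with
  | nil => rfl
  | cons a t ih =>
      simp only [firstLe]
      rw [if_neg (h a (by simp))]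
      exact ih fun v hv => h v (by simp [hv])

lemma candB_succ_self (arr : List Int) (idx : Nat) : candB arr (idx + 1) idx = true := by
  rw [candB_iff]; intro k h1 h2; omega

lemma candB_succ_lt (arr : List Int) (idx j : Nat) (hj : j < idx) :
    candB arr (idx + 1) j = (candB arr idx j && decide (gv arr j < gv arr idx)) := by
  rw [Bool.eq_iff_iff]
  simp only [Bool.and_eq_true, decide_eq_true_eq, candB_iff]
  constructor
  · intro h
    exact ⟨fun k h1 h2 => h k h1 (by omega), h idx hj (by omega)⟩
  · rintro ⟨h1, h2⟩ k hk1 hk2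
    rcases Nat.lt_succ_iff_lt_or_eq.mp hk2 with hk | hk
    · exact h1 k hk1 hk
    · subst hk; exact h2

-- for a list whose predicate truth is upward-closed along the list, filter = dropWhile of the negation
lemma filter_eq_dropWhile {α : Type} (p : α → Bool) (l : List α)
    (h : l.Pairwise (fun a b => p a = true → p b = true)) :
    l.filter p = l.dropWhile (fun a => !p a) := by
  induction l with
  | nil => rfl
  | cons a t ih =>
      rcases List.pairwise_cons.mp h with ⟨ha, ht⟩
      cases hpa : p a with
      | true =>
          simp only [List.filter_cons, List.dropWhile_cons, hpa, Bool.not_true, if_true]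
          rw [if_neg (by simp)]
          rw [List.filter_eq_self.mpr fun b hb => ha b hb hpa]
      | false =>
          simp only [List.filter_cons, List.dropWhile_cons, hpa, Bool.not_false, if_true]
          simpa [hpa] using ih ht

lemma takeWhile_eq_filter {α : Type} (p : α → Bool) (l : List α)
    (h : l.Pairwise (fun a b => p b = true → p a = true)) :
    l.takeWhile p = l.filter p := by
  induction l with
  | nil => rfl
  | cons a t ih =>
      rcases List.pairwise_cons.mp h with ⟨ha, ht⟩
      cases hpa : p a with
      | true =>
          simp only [List.takeWhile_cons, List.filter_cons, hpa, if_true]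
          rw [ih ht]
      | false =>
          simp only [List.takeWhile_cons, List.filter_cons, hpa]
          simp only [Bool.false_eq_true, if_false]
          rw [eq_comm, List.filter_eq_nil_iff]
          intro b hb
          intro hpb
          exact absurd (ha b hb hpb) (by simp [hpa])

lemma mem_stackSpec (arr : List Int) (idx : Nat) (q : Nat × Int) :
    q ∈ stackSpec arr idx ↔ q.2 = gv arr q.1 ∧ q.1 < idx ∧ candB arr idx q.1 = true := by
  simp only [stackSpec, List.mem_map, List.mem_reverse, List.mem_filter, List.mem_range]
  constructor
  · rintro ⟨j, ⟨hj, hc⟩, rfl⟩; exact ⟨rfl, hj, hc⟩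
  · rintro ⟨h1, h2, h3⟩
    exact ⟨q.1, ⟨h2, h3⟩, by cases q with | mk a b => simp at h1 ⊢; omega⟩

lemma stackSpec_pairwise_val (arr : List Int) (idx : Nat) :
    (stackSpec arr idx).Pairwise (fun a b => b.2 < a.2) := by
  rw [stackSpec, List.pairwise_map, List.pairwise_reverse]
  have h0 : ((List.range idx).filter (candB arr idx)).Pairwise (· < ·) :=
    (List.pairwise_lt_range).sublist (List.filter_sublist (l := List.range idx))
  refine List.Pairwise.imp_of_mem ?_ h0
  intro a b ha hb hab
  rcases List.mem_filter.mp ha with ⟨ha1, ha2⟩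
  rcases List.mem_filter.mp hb with ⟨hb1, hb2⟩
  exact (candB_iff arr idx a).mp ha2 b hab (List.mem_range.mp hb1)

lemma popPhase_eq (item : Int) : ∀ (S : List (Nat × Int)) (R : List Int),
    popPhase item S R = (S.dropWhile (fun p => decide (item ≤ p.2)),
      (S.takeWhile (fun p => decide (item ≤ p.2))).foldl (fun r p => r.set p.1 item) R) := by
  intro S
  induction S with
  | nil => intro R; rfl
  | cons a t ih =>
      intro R
      cases a with
      | mk j v =>
          by_cases hv : item ≤ v
          · simp only [popPhase, List.dropWhile_cons, List.takeWhile_cons, hv, if_pos,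
              decide_eq_true_eq, decide_true]
            rw [ih]
            rfl
          · simp only [popPhase, List.dropWhile_cons, List.takeWhile_cons, hv, if_neg,
              decide_eq_true_eq, decide_false]
            rfl

lemma foldl_set_length (item : Int) : ∀ (ps : List (Nat × Int)) (R : List Int),
    (ps.foldl (fun r p => r.set p.1 item) R).length = R.length := by
  intro ps
  induction ps with
  | nil => intro R; rfl
  | cons a t ih => intro R; simp only [List.foldl_cons]; rw [ih]; simp

lemma foldl_set_get (item : Int) : ∀ (ps : List (Nat × Int)) (R : List Int) (j : Nat)
    (hj : j < R.length),
    (ps.foldl (fun r p => r.set p.1 item) R)[j]'(by rw [foldl_set_length]; exact hj)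
      = if ∃ p ∈ ps, p.1 = j then item else R[j] := by
  intro ps
  induction ps with
  | nil => intro R j hj; simp
  | cons a t ih =>
      intro R j hj
      simp only [List.foldl_cons]
      rw [ih _ j (by simp [hj])]
      by_cases ht : ∃ p ∈ t, p.1 = j
      · rw [if_pos ht, if_pos (by rcases ht with ⟨p, hp1, hp2⟩; exact ⟨p, by simp [hp1], hp2⟩)]
      · rw [if_neg ht]
        by_cases ha : a.1 = j
        · rw [if_pos ⟨a, by simp, ha⟩]
          subst ha
          exact List.getElem_set_self (by simpa using hj)
        · rw [if_neg (by rintro ⟨p, hp1, hp2⟩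
                         rcases List.mem_cons.mp hp1 with h | h
                         · exact ha (h ▸ hp2)
                         · exact ht ⟨p, h, hp2⟩)]
          exact List.getElem_set_ne (by omega) _

lemma mem_take_drop (arr : List Int) (j idx : Nat) (hidx : idx ≤ arr.length) :
    ∀ v ∈ (arr.take idx).drop (j + 1), ∃ k, j < k ∧ k < idx ∧ gv arr k = v := by
  intro v hv
  rcases List.mem_iff_getElem.mp hv with ⟨i, hi, hval⟩
  have hlen : ((arr.take idx).drop (j + 1)).length = (arr.take idx).length - (j + 1) := by simp
  have hlt : j + 1 + i < (arr.take idx).length := by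
    rw [hlen] at hi; omega
  have htl : (arr.take idx).length = idx := by simp; omega
  refine ⟨j + 1 + i, by omega, by omega, ?_⟩
  rw [← hval]
  have h1 : ((arr.take idx).drop (j + 1))[i]'hi = (arr.take idx)[j + 1 + i]'hlt := by
    simp
  rw [h1]
  have h2 : j + 1 + i < arr.length := by omega
  simp [gv, List.getD_eq_getElem?_getD, List.getElem?_eq_getElem h2]

lemma drop_split (arr : List Int) (j idx : Nat) (hj : j + 1 ≤ idx) (hidx : idx ≤ arr.length) :
    arr.drop (j + 1) = (arr.take idx).drop (j + 1) ++ arr.drop idx := by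
  conv_lhs => rw [← List.take_append_drop idx arr]
  rw [List.drop_append_of_le_length (by simp; omega)]

lemma gv_getElem (arr : List Int) (k : Nat) (hk : k < arr.length) : arr[k] = gv arr k := by
  simp [gv, List.getD_eq_getElem?_getD, List.getElem?_eq_getElem hk]

lemma rightSpec_pop (arr : List Int) (idx j : Nat) (hidx : idx < arr.length) (hj : j < idx)
    (hc : candB arr idx j = true) (hle : gv arr idx ≤ gv arr j) :
    rightSpec arr j = gv arr idx := by
  show firstLe (gv arr j) (arr.drop (j + 1)) = gv arr idx
  rw [drop_split arr j idx (by omega) (by omega)]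
  rw [firstLe_append _ _ _ (by
    intro v hv
    rcases mem_take_drop arr j idx (by omega) v hv with ⟨k, hk1, hk2, rfl⟩
    exact not_le.mpr ((candB_iff arr idx j).mp hc k hk1 hk2))]
  rw [List.drop_eq_getElem_cons hidx, gv_getElem arr idx hidx]
  simp only [firstLe]
  rw [if_pos hle]

lemma rightSpec_none (arr : List Int) (j : Nat) (hj : j < arr.length)
    (hc : candB arr arr.length j = true) : rightSpec arr j = -1 := by
  show firstLe (gv arr j) (arr.drop (j + 1)) = -1
  refine firstLe_neg_one _ _ ?_
  intro v hv
  rcases List.mem_iff_getElem.mp hv with ⟨i, hi, hval⟩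
  have hlt : j + 1 + i < arr.length := by simp at hi; omega
  have : arr[j + 1 + i]'hlt = v := by
    rw [← hval]; simp
  rw [← this, gv_getElem arr _ hlt]
  exact not_le.mpr ((candB_iff arr arr.length j).mp hc (j + 1 + i) (by omega) hlt)

lemma stackSpec_succ (arr : List Int) (idx : Nat) (hidx : idx < arr.length) :
    stackSpec arr (idx + 1)
      = (idx, gv arr idx) :: (stackSpec arr idx).dropWhile (fun p => decide (gv arr idx ≤ p.2)) := by
  have hpred : (fun p : Nat × Int => decide (gv arr idx ≤ p.2))
      = (fun p : Nat × Int => !decide (p.2 < gv arr idx)) := by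
    funext p; by_cases h : gv arr idx ≤ p.2 <;> simp [h] <;> omega
  have hcong : (List.range idx).filter (candB arr (idx + 1))
      = ((List.range idx).filter (candB arr idx)).filter (fun j => decide (gv arr j < gv arr idx)) := by
    rw [List.filter_filter]
    refine List.filter_congr ?_
    intro j hj
    rw [candB_succ_lt arr idx j (List.mem_range.mp hj), Bool.and_comm]
  have hpw2 : (((List.range idx).filter (candB arr idx)).reverse).Pairwise
      (fun a b => decide (gv arr a < gv arr idx) = true → decide (gv arr b < gv arr idx) = true) := by
    have := stackSpec_pairwise_val arr idx
    rw [stackSpec, List.pairwise_map] at this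
    refine List.Pairwise.imp ?_ this
    intro a b hab
    simp only [decide_eq_true_eq] at *
    omega
  have hrev : ((((List.range idx).filter (candB arr idx)).filter
        (fun j => decide (gv arr j < gv arr idx))).reverse).map (fun j => (j, gv arr j))
      = (stackSpec arr idx).dropWhile (fun p => !decide (p.2 < gv arr idx)) := by
    rw [← List.filter_reverse, filter_eq_dropWhile _ _ hpw2, stackSpec, List.dropWhile_map]
    rfl
  rw [hpred]
  conv_lhs => rw [stackSpec, List.range_succ, List.filter_append]
  rw [show (List.filter (candB arr (idx + 1)) [idx]) = [idx] by
    simp [List.filter_cons, candB_succ_self]]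
  rw [hcong, List.reverse_append]
  simp only [List.reverse_cons, List.reverse_nil, List.nil_append, List.singleton_append,
    List.map_cons]
  rw [hrev]

lemma stackSpec_dropWhile_cons (arr : List Int) (idx : Nat) (j : Nat) (v : Int)
    (t : List (Nat × Int)) (item : Int)
    (h : (stackSpec arr idx).dropWhile (fun p => decide (item ≤ p.2)) = (j, v) :: t) :
    v < item ∧ v = gv arr j ∧ j < idx ∧ candB arr idx j = true := by
  have hmem : (j, v) ∈ stackSpec arr idx :=
    List.dropWhile_sublist (l := stackSpec arr idx) (p := fun p => decide (item ≤ p.2))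
      |>.mem (by simp [h])
  have hhead := List.head_dropWhile_not (p := fun p : Nat × Int => decide (item ≤ p.2))
    (l := stackSpec arr idx) (by simp [h])
  simp only [h, List.head_cons] at hhead
  have hvi : ¬ item ≤ v := by simpa using hhead
  rcases (mem_stackSpec arr idx (j, v)).mp hmem with ⟨h1, h2, h3⟩
  exact ⟨by omega, h1, h2, h3⟩

lemma firstLt_stack (arr : List Int) : ∀ idx, idx ≤ arr.length → ∀ x : Int,
    firstLt x ((arr.take idx).reverse) = firstLt x ((stackSpec arr idx).map Prod.snd) := by
  intro idx
  induction idx with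
  | zero => intro _ x; simp [stackSpec]
  | succ idx ih =>
      intro hle x
      have hidx : idx < arr.length := by omega
      have htake : arr.take (idx + 1) = arr.take idx ++ [gv arr idx] := by
        rw [List.take_succ, List.getElem?_eq_getElem hidx, gv_getElem arr idx hidx]
        rfl
      rw [htake, List.reverse_append, stackSpec_succ arr idx hidx]
      simp only [List.reverse_cons, List.reverse_nil, List.nil_append, List.cons_append,
        List.map_cons, List.nil_append]
      simp only [firstLt]
      by_cases hx : gv arr idx < x
      · rw [if_pos hx, if_pos hx]
      · rw [if_neg hx, if_neg hx]
        rw [ih (by omega) x]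
        conv_lhs => rw [← List.takeWhile_append_dropWhile
          (p := fun p : Nat × Int => decide (gv arr idx ≤ p.2)) (l := stackSpec arr idx)]
        rw [List.map_append]
        refine firstLt_append x _ _ ?_
        intro v hv
        rcases List.mem_map.mp hv with ⟨p, hp, rfl⟩
        have := List.mem_takeWhile_imp hp
        simp only [decide_eq_true_eq] at this
        omega

lemma left_step (arr : List Int) (idx : Nat) (hidx : idx < arr.length) :
    (match (stackSpec arr idx).dropWhile (fun p => decide (gv arr idx ≤ p.2)) with
      | [] => leftList arr idx
      | (_, v) :: _ => (leftList arr idx).set idx v) = leftList arr (idx + 1) := by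
  have hspec : leftSpec arr idx
      = firstLt (gv arr idx)
          (((stackSpec arr idx).dropWhile (fun p => decide (gv arr idx ≤ p.2))).map Prod.snd) := by
    show firstLt (gv arr idx) ((arr.take idx).reverse) = _
    rw [firstLt_stack arr idx (by omega) (gv arr idx)]
    conv_lhs => rw [← List.takeWhile_append_dropWhile
      (p := fun p : Nat × Int => decide (gv arr idx ≤ p.2)) (l := stackSpec arr idx)]
    rw [List.map_append]
    refine firstLt_append _ _ _ ?_
    intro v hv
    rcases List.mem_map.mp hv with ⟨p, hp, rfl⟩
    have := List.mem_takeWhile_imp hp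
    simp only [decide_eq_true_eq] at this
    omega
  have hext : ∀ (w : Int), w = leftSpec arr idx →
      (leftList arr idx).set idx w = leftList arr (idx + 1) := by
    intro w hw
    refine List.ext_getElem (by simp [leftList]) ?_
    intro i hi1 hi2
    have hin : i < arr.length := by simpa [leftList] using hi2
    by_cases hie : i = idx
    · subst hie
      rw [List.getElem_set_self (by simpa [leftList] using hi1)]
      simp only [leftList, List.getElem_map, List.getElem_range]
      rw [if_pos (by omega)]
      exact hw
    · rw [List.getElem_set_ne (by omega)]
      simp only [leftList, List.getElem_map, List.getElem_range]
      by_cases hlt : i < idx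
      · rw [if_pos hlt, if_pos (by omega)]
      · rw [if_neg hlt, if_neg (by omega)]
  cases hD : (stackSpec arr idx).dropWhile (fun p => decide (gv arr idx ≤ p.2)) with
  | nil =>
      have hw : leftSpec arr idx = -1 := by rw [hspec, hD]; rfl
      refine List.ext_getElem (by simp [leftList]) ?_
      intro i hi1 hi2
      simp only [leftList, List.getElem_map, List.getElem_range]
      by_cases hie : i = idx
      · subst hie
        rw [if_neg (by omega), if_pos (by omega), hw]
      · by_cases hlt : i < idx
        · rw [if_pos hlt, if_pos (by omega)]
        · rw [if_neg hlt, if_neg (by omega)]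
  | cons hd tl =>
      cases hd with
      | mk j v =>
          have hw : v = leftSpec arr idx := by
            rcases stackSpec_dropWhile_cons arr idx j v tl (gv arr idx) hD with ⟨hv, _, _, _⟩
            rw [hspec, hD]
            simp only [List.map_cons, firstLt]
            rw [if_pos hv]
          exact hext v hw

lemma right_step (arr : List Int) (idx : Nat) (hidx : idx < arr.length) :
    ((stackSpec arr idx).takeWhile (fun p => decide (gv arr idx ≤ p.2))).foldl
        (fun r p => r.set p.1 (gv arr idx)) (rightList arr idx)
      = rightList arr (idx + 1) := by
  have htf : (stackSpec arr idx).takeWhile (fun p => decide (gv arr idx ≤ p.2))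
      = (stackSpec arr idx).filter (fun p => decide (gv arr idx ≤ p.2)) := by
    refine takeWhile_eq_filter _ _ ?_
    refine List.Pairwise.imp_of_mem ?_ (stackSpec_pairwise_val arr idx)
    intro a b _ _ hab
    simp only [decide_eq_true_eq]
    omega
  refine List.ext_getElem (by rw [foldl_set_length]; simp [rightList]) ?_
  intro jj hj1 hj2
  have hjn : jj < arr.length := by simpa [rightList] using hj2
  have hjr : jj < (rightList arr idx).length := by simp [rightList]; omega
  rw [foldl_set_get (gv arr idx) _ (rightList arr idx) jj hjr]
  simp only [rightList, List.getElem_map, List.getElem_range]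
  by_cases hpop : ∃ p ∈ (stackSpec arr idx).takeWhile (fun p => decide (gv arr idx ≤ p.2)), p.1 = jj
  · rw [if_pos hpop]
    rcases hpop with ⟨p, hp, hpj⟩
    rw [htf] at hp
    rcases List.mem_filter.mp hp with ⟨hpS, hpq⟩
    rcases (mem_stackSpec arr idx p).mp hpS with ⟨hp1, hp2, hp3⟩
    simp only [decide_eq_true_eq] at hpq
    subst hpj
    rw [hp1] at hpq
    rw [if_pos ⟨by omega, by
      rw [candB_succ_lt arr idx p.1 hp2]
      simp only [Bool.and_eq_true, decide_eq_true_eq, not_and]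
      intro _
      omega⟩]
    exact (rightSpec_pop arr idx p.1 hidx hp2 hp3 hpq).symm
  · rw [if_neg hpop]
    by_cases hje : jj = idx
    · subst hje
      rw [if_neg (by omega), if_neg (by
        rintro ⟨_, hcand⟩
        exact hcand (candB_succ_self arr jj))]
    · by_cases hjlt : jj < idx
      · by_cases hcand : candB arr idx jj = true
        · rw [if_neg (by rintro ⟨_, hc⟩; exact hc hcand)]
          rw [if_neg (by
            rintro ⟨_, hc⟩
            refine hc ?_
            rw [candB_succ_lt arr idx jj hjlt, hcand]
            simp only [Bool.true_and, decide_eq_true_eq]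
            by_contra hge
            refine hpop ?_
            rw [htf]
            refine ⟨(jj, gv arr jj), List.mem_filter.mpr ⟨?_, by simp; omega⟩, rfl⟩
            exact (mem_stackSpec arr idx (jj, gv arr jj)).mpr ⟨rfl, hjlt, hcand⟩)]
        · rw [if_pos ⟨hjlt, fun h => hcand h⟩]
          rw [if_pos ⟨by omega, by
            rw [candB_succ_lt arr idx jj hjlt]
            simp only [Bool.and_eq_true, not_and]
            intro hc
            exact absurd hc hcand⟩]
      · rw [if_neg (by omega), if_neg (by omega)]

theorem go_main (arr : List Int) : ∀ m idx, idx + m = arr.length →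
    aGo (arr.drop idx) idx (stackSpec arr idx) (leftList arr idx) (rightList arr idx)
      = (leftList arr arr.length, rightList arr arr.length) := by
  intro m
  induction m with
  | zero =>
      intro idx h
      rw [show idx = arr.length by omega]
      rw [List.drop_length]
      rfl
  | succ m ih =>
      intro idx h
      have hidx : idx < arr.length := by omega
      rw [List.drop_eq_getElem_cons hidx, gv_getElem arr idx hidx]
      show aGo (gv arr idx :: arr.drop (idx + 1)) idx (stackSpec arr idx)
        (leftList arr idx) (rightList arr idx) = _
      rw [aGo, popPhase_eq]
      rw [left_step arr idx hidx, right_step arr idx hidx, ← stackSpec_succ arr idx hidx]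
      exact ih (idx + 1) (by omega)

lemma A_eq_spec (arr : List Int) :
    monotonic_increasing arr
      = ((List.range arr.length).map (leftSpec arr), (List.range arr.length).map (rightSpec arr)) := by
  have h0s : stackSpec arr 0 = [] := by simp [stackSpec]
  have h0l : leftList arr 0 = List.replicate arr.length (-1) := by
    refine List.ext_getElem (by simp [leftList]) ?_
    intro i hi1 hi2
    simp only [leftList, List.getElem_map, List.getElem_range, List.getElem_replicate]
    rw [if_neg (by omega)]
  have h0r : rightList arr 0 = List.replicate arr.length (-1) := by
    refine List.ext_getElem (by simp [rightList]) ?_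
    intro i hi1 hi2
    simp only [rightList, List.getElem_map, List.getElem_range, List.getElem_replicate]
    rw [if_neg (by rintro ⟨h, _⟩; omega)]
  have hmain := go_main arr arr.length 0 (by omega)
  rw [List.drop_zero, h0s, h0l, h0r] at hmain
  rw [monotonic_increasing, hmain]
  refine Prod.ext ?_ ?_
  · refine List.map_congr_left ?_
    intro i hi
    show (if i < arr.length then leftSpec arr i else -1) = leftSpec arr i
    rw [if_pos (List.mem_range.mp hi)]
  · refine List.map_congr_left ?_
    intro j hj
    have hjn : j < arr.length := List.mem_range.mp hj
    show (if j < arr.length ∧ ¬ candB arr arr.length j = true then rightSpec arr j else -1)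
      = rightSpec arr j
    by_cases hc : candB arr arr.length j = true
    · rw [if_neg (by rintro ⟨_, h⟩; exact h hc)]
      exact (rightSpec_none arr j hjn hc).symm
    · rw [if_pos ⟨hjn, fun h => hc h⟩]

-- ===== B side: the jump tables compute the nearest-smaller indices =====

-- index scanned by B's left inner loop: first j = m-1, m-2, ..., 0 with arr[j] < x, else -1
def idxLF (arr : List Int) (x : Int) : Nat → Int
  | 0 => -1
  | j + 1 => if gv arr j < x then (j : Int) else idxLF arr x j

def idxL (arr : List Int) (i : Nat) : Int := idxLF arr (gv arr i) i

-- first j = s, s+1, ..., n-1 with arr[j] ≤ x, else n (call sites keep s + fuel = n)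
def idxRF (arr : List Int) (x : Int) (n : Nat) : Nat → Nat → Int
  | 0, _ => (n : Int)
  | fuel + 1, s => if gv arr s ≤ x then (s : Int) else idxRF arr x n fuel (s + 1)

def idxR (arr : List Int) (n i : Nat) : Int := idxRF arr (gv arr i) n (n - (i + 1)) (i + 1)

lemma idxLF_spec (arr : List Int) (x : Int) : ∀ m,
    (idxLF arr x m = -1 ∧ ∀ k, k < m → ¬ gv arr k < x)
    ∨ (∃ jn : Nat, idxLF arr x m = (jn : Int) ∧ jn < m ∧ gv arr jn < x
        ∧ ∀ k, jn < k → k < m → ¬ gv arr k < x) := by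
  intro m
  induction m with
  | zero => exact Or.inl ⟨rfl, by omega⟩
  | succ m ih =>
      by_cases h : gv arr m < x
      · refine Or.inr ⟨m, ?_, by omega, h, by omega⟩
        simp [idxLF, h]
      · rcases ih with ⟨h1, h2⟩ | ⟨jn, h1, h2, h3, h4⟩
        · refine Or.inl ⟨?_, ?_⟩
          · simp [idxLF, h, h1]
          · intro k hk
            rcases Nat.lt_succ_iff_lt_or_eq.mp hk with hk' | hk'
            · exact h2 k hk'
            · subst hk'; exact h
        · refine Or.inr ⟨jn, ?_, by omega, h3, ?_⟩
          · simp [idxLF, h, h1]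
          · intro k hk1 hk2
            rcases Nat.lt_succ_iff_lt_or_eq.mp hk2 with hk' | hk'
            · exact h4 k hk1 hk'
            · subst hk'; exact h

lemma idxLF_eq_of (arr : List Int) (x : Int) : ∀ (m : Nat) (j : Int), -1 ≤ j → j < (m : Int) →
    (j = -1 ∨ (0 ≤ j ∧ gv arr j.toNat < x)) →
    (∀ k : Nat, j < (k : Int) → k < m → ¬ gv arr k < x) →
    idxLF arr x m = j := by
  intro m
  induction m with
  | zero => intro j h1 h2 _ _; simp only [idxLF]; omega
  | succ m ih =>
      intro j h1 h2 h3 h4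
      by_cases hj : j = (m : Int)
      · subst hj
        rcases h3 with h3 | ⟨h3a, h3b⟩
        · omega
        · simp only [Int.toNat_natCast] at h3b
          simp [idxLF, h3b]
      · have hjm : j < (m : Int) := by omega
        have hm : ¬ gv arr m < x := h4 m (by omega) (by omega)
        simp only [idxLF, if_neg hm]
        exact ih j h1 hjm h3 (fun k hk1 hk2 => h4 k hk1 (by omega))

lemma firstLt_idxLF (arr : List Int) (x : Int) : ∀ m, m ≤ arr.length →
    firstLt x ((arr.take m).reverse)
      = (if 0 ≤ idxLF arr x m then gv arr (idxLF arr x m).toNat else -1) := by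
  intro m
  induction m with
  | zero => intro _; simp [idxLF, firstLt]
  | succ m ih =>
      intro hm
      have hmlt : m < arr.length := by omega
      have htake : arr.take (m + 1) = arr.take m ++ [gv arr m] := by
        rw [List.take_succ, List.getElem?_eq_getElem hmlt, gv_getElem arr m hmlt]
        rfl
      rw [htake, List.reverse_append]
      simp only [List.reverse_cons, List.reverse_nil, List.nil_append, List.singleton_append]
      simp only [firstLt, idxLF]
      by_cases h : gv arr m < x
      · simp [h]
      · rw [if_neg h, if_neg h]
        exact ih (by omega)

lemma idxRF_spec (arr : List Int) (x : Int) (n : Nat) : ∀ (fuel s : Nat), s + fuel = n →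
    (idxRF arr x n fuel s = (n : Int) ∧ ∀ k, s ≤ k → k < n → ¬ gv arr k ≤ x)
    ∨ (∃ jn : Nat, idxRF arr x n fuel s = (jn : Int) ∧ s ≤ jn ∧ jn < n ∧ gv arr jn ≤ x
        ∧ ∀ k, s ≤ k → k < jn → ¬ gv arr k ≤ x) := by
  intro fuel
  induction fuel with
  | zero => intro s hs; exact Or.inl ⟨rfl, by omega⟩
  | succ fuel ih =>
      intro s hs
      by_cases h : gv arr s ≤ x
      · refine Or.inr ⟨s, ?_, by omega, by omega, h, by omega⟩
        simp [idxRF, h]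
      · rcases ih (s + 1) (by omega) with ⟨h1, h2⟩ | ⟨jn, h1, h2, h3, h4, h5⟩
        · refine Or.inl ⟨by simp [idxRF, h, h1], ?_⟩
          intro k hk1 hk2
          by_cases hke : k = s
          · subst hke; exact h
          · exact h2 k (by omega) hk2
        · refine Or.inr ⟨jn, by simp [idxRF, h, h1], by omega, h3, h4, ?_⟩
          intro k hk1 hk2
          by_cases hke : k = s
          · subst hke; exact h
          · exact h5 k (by omega) hk2

lemma idxRF_eq_of (arr : List Int) (x : Int) (n : Nat) : ∀ (fuel s : Nat), s + fuel = n →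
    ∀ (j : Int), (s : Int) ≤ j → j ≤ (n : Int) →
    (j = (n : Int) ∨ gv arr j.toNat ≤ x) →
    (∀ k : Nat, s ≤ k → (k : Int) < j → ¬ gv arr k ≤ x) →
    idxRF arr x n fuel s = j := by
  intro fuel
  induction fuel with
  | zero => intro s hs j h1 h2 _ _; simp only [idxRF]; omega
  | succ fuel ih =>
      intro s hs j h1 h2 h3 h4
      by_cases hj : j = (s : Int)
      · subst hj
        rcases h3 with h3 | h3
        · omega
        · simp only [Int.toNat_natCast] at h3
          simp [idxRF, h3]
      · have hs' : ¬ gv arr s ≤ x := h4 s (by omega) (by omega)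
        simp only [idxRF, if_neg hs']
        exact ih (s + 1) (by omega) j (by omega) h2 h3 (fun k hk1 hk2 => h4 k (by omega) hk2)

lemma firstLe_idxRF (arr : List Int) (x : Int) : ∀ (fuel s : Nat), s + fuel = arr.length →
    firstLe x (arr.drop s)
      = (if idxRF arr x arr.length fuel s < (arr.length : Int)
          then gv arr (idxRF arr x arr.length fuel s).toNat else -1) := by
  intro fuel
  induction fuel with
  | zero =>
      intro s hs
      rw [show s = arr.length by omega, List.drop_length]
      simp [idxRF, firstLe]
  | succ fuel ih =>
      intro s hs
      have hslt : s < arr.length := by omega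
      rw [List.drop_eq_getElem_cons hslt, gv_getElem arr s hslt]
      simp only [firstLe, idxRF]
      by_cases h : gv arr s ≤ x
      · rw [if_pos h, if_pos h, if_pos (by push_cast; omega)]
        simp
      · rw [if_neg h, if_neg h]
        exact ih (s + 1) (by omega)

lemma jumpLeft_ok (arr : List Int) (i : Nat) (tbl : List Int)
    (htbl : ∀ k : Nat, k < i → tbl.getD k 0 = idxL arr k) :
    ∀ (fuel : Nat) (j : Int), -1 ≤ j → j < (i : Int) → (j + 1).toNat < fuel →
    (∀ k : Nat, j < (k : Int) → k < i → ¬ gv arr k < gv arr i) →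
    jumpLeft arr (gv arr i) tbl fuel j = idxL arr i := by
  intro fuel
  induction fuel with
  | zero => intro j _ _ h _; omega
  | succ fuel ih =>
      intro j h1 h2 h3 h4
      by_cases hj : j = -1
      · subst hj
        simp only [jumpLeft]
        rw [if_neg (by rintro ⟨h, _⟩; omega)]
        exact (idxLF_eq_of arr (gv arr i) i (-1) (by omega) (by omega) (Or.inl rfl)
          (fun k hk1 hk2 => h4 k (by omega) hk2)).symm
      · have hj0 : 0 ≤ j := by omega
        set jn := j.toNat with hjn
        have hjj : (jn : Int) = j := Int.toNat_of_nonneg hj0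
        have hjni : jn < i := by omega
        by_cases hval : gv arr jn < gv arr i
        · simp only [jumpLeft]
          rw [if_neg (by
            rintro ⟨_, hgg⟩
            have : arr.getD j.toNat 0 = gv arr jn := rfl
            rw [this] at hgg
            omega)]
          exact (idxLF_eq_of arr (gv arr i) i j (by omega) h2 (Or.inr ⟨hj0, hval⟩) h4).symm
        · simp only [jumpLeft]
          rw [if_pos ⟨hj0, by
            show gv arr i ≤ arr.getD j.toNat 0
            have : arr.getD j.toNat 0 = gv arr jn := rfl
            rw [this]; omega⟩]
          rw [htbl jn hjni]
          have hj' := idxLF_spec arr (gv arr jn) jn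
          rcases hj' with ⟨h1', h2'⟩ | ⟨jn', h1', h2', h3', h4'⟩
          · refine ih (idxL arr jn) (by rw [idxL, h1']) (by rw [idxL, h1']; omega)
              (by rw [idxL, h1']; simp; omega) ?_
            intro k hk1 hk2
            rw [idxL, h1'] at hk1
            by_cases hkj : (k : Int) < j
            · have hkjn : k < jn := by omega
              have := h2' k hkjn
              intro hcon; exact this (by omega)
            · by_cases hke : (k : Int) = j
              · have : k = jn := by omega
                subst this; exact hval
              · exact h4 k (by omega) hk2
          · refine ih (idxL arr jn) (by rw [idxL, h1']; omega) (by rw [idxL, h1']; push_cast; omega)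
              (by rw [idxL, h1']; simp; omega) ?_
            intro k hk1 hk2
            rw [idxL, h1'] at hk1
            by_cases hkj : (k : Int) < j
            · have hkjn : jn' < k ∧ k < jn := by constructor <;> omega
              have := h4' k hkjn.1 hkjn.2
              intro hcon; exact this (by omega)
            · by_cases hke : (k : Int) = j
              · have : k = jn := by omega
                subst this; exact hval
              · exact h4 k (by omega) hk2

lemma buildLeft_spec (arr : List Int) : ∀ i, i ≤ arr.length →
    (buildLeft arr i).length = i ∧ ∀ k, k < i → (buildLeft arr i).getD k 0 = idxL arr k := by
  intro i
  induction i with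
  | zero => intro _; exact ⟨rfl, by omega⟩
  | succ i ih =>
      intro hi
      rcases ih (by omega) with ⟨hlen, hval⟩
      refine ⟨by simp [buildLeft, hlen], ?_⟩
      intro k hk
      by_cases hke : k = i
      · subst hke
        show (buildLeft arr k ++ [jumpLeft arr (arr.getD k 0) (buildLeft arr k) (k + 1) ((k : Int) - 1)]).getD k 0 = idxL arr k
        rw [List.getD_eq_getElem?_getD, List.getElem?_append_right (by omega)]
        rw [hlen]
        simp only [Nat.sub_self, List.getElem?_cons_zero, Option.getD_some]
        refine jumpLeft_ok arr k (buildLeft arr k) hval (k + 1) ((k : Int) - 1)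
          (by omega) (by omega) (by omega) (by intro k' hk1 hk2; omega)
      · have hki : k < i := by omega
        show (buildLeft arr i ++ [_]).getD k 0 = idxL arr k
        rw [List.getD_eq_getElem?_getD, List.getElem?_append_left (by omega),
          ← List.getD_eq_getElem?_getD]
        exact hval k hki

lemma jumpRight_ok (arr : List Int) (n i : Nat) (tbl : List Int) (hn : n = arr.length)
    (hi : i < n)
    (htbl : ∀ k : Nat, i < k → k < n → tbl.getD k 0 = idxR arr n k) :
    ∀ (fuel : Nat) (j : Int), (i : Int) < j → j ≤ (n : Int) → n - j.toNat < fuel →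
    (∀ k : Nat, i < k → (k : Int) < j → ¬ gv arr k ≤ gv arr i) →
    jumpRight arr n (gv arr i) tbl fuel j = idxR arr n i := by
  intro fuel
  induction fuel with
  | zero => intro j _ _ h _; omega
  | succ fuel ih =>
      intro j h1 h2 h3 h4
      have hj0 : 0 ≤ j := by omega
      set jn := j.toNat with hjn
      have hjj : (jn : Int) = j := Int.toNat_of_nonneg hj0
      by_cases hj : j = (n : Int)
      · subst hj
        simp only [jumpRight]
        rw [if_neg (by rintro ⟨h, _⟩; omega)]
        exact (idxRF_eq_of arr (gv arr i) n (n - (i + 1)) (i + 1) (by omega) (n : Int)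
          (by omega) (by omega) (Or.inl rfl)
          (fun k hk1 hk2 => h4 k (by omega) hk2)).symm
      · have hjltn : jn < n := by omega
        by_cases hval : gv arr jn ≤ gv arr i
        · simp only [jumpRight]
          rw [if_neg (by
            rintro ⟨_, hgg⟩
            have : arr.getD j.toNat 0 = gv arr jn := rfl
            rw [this] at hgg
            omega)]
          refine (idxRF_eq_of arr (gv arr i) n (n - (i + 1)) (i + 1) (by omega) j
            (by omega) h2 (Or.inr (by rw [← hjn]; exact hval)) ?_).symm
          intro k hk1 hk2
          exact h4 k (by omega) hk2
        · simp only [jumpRight]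
          rw [if_pos ⟨by omega, by
            show gv arr i < arr.getD j.toNat 0
            have : arr.getD j.toNat 0 = gv arr jn := rfl
            rw [this]; omega⟩]
          rw [htbl jn (by omega) hjltn]
          have hspec := idxRF_spec arr (gv arr jn) n (n - (jn + 1)) (jn + 1) (by omega)
          rcases hspec with ⟨h1', h2'⟩ | ⟨jn', h1', h2', h3', h4', h5'⟩
          · refine ih (idxR arr n jn) (by rw [idxR, h1']; omega) (by rw [idxR, h1'])
              (by rw [idxR, h1']; simp; omega) ?_
            intro k hk1 hk2
            rw [idxR, h1'] at hk2
            by_cases hkj : j < (k : Int)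
            · intro hcon
              exact h2' k (by omega) (by omega) (by omega)
            · by_cases hke : (k : Int) = j
              · have : k = jn := by omega
                subst this; exact hval
              · exact h4 k hk1 (by omega)
          · refine ih (idxR arr n jn) (by rw [idxR, h1']; push_cast; omega)
              (by rw [idxR, h1']; push_cast; omega)
              (by rw [idxR, h1']; simp; omega) ?_
            intro k hk1 hk2
            rw [idxR, h1'] at hk2
            by_cases hkj : j < (k : Int)
            · have hk' := h5' k (by omega) (by push_cast at hk2; omega)
              intro hcon; exact hk' (by omega)
            · by_cases hke : (k : Int) = j
              · have : k = jn := by omega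
                subst this; exact hval
              · exact h4 k hk1 (by omega)

lemma buildRight_spec (arr : List Int) (n : Nat) (hn : n = arr.length) :
    ∀ (m : Nat) (tbl : List Int), m ≤ n → tbl.length = n →
    (∀ k, m ≤ k → k < n → tbl.getD k 0 = idxR arr n k) →
    (buildRight arr n m tbl).length = n
      ∧ ∀ k, k < n → (buildRight arr n m tbl).getD k 0 = idxR arr n k := by
  intro m
  induction m with
  | zero =>
      intro tbl _ hlen hval
      exact ⟨hlen, fun k hk => hval k (by omega) hk⟩
  | succ m ih =>
      intro tbl hm hlen hval
      show (buildRight arr n m (tbl.set m _)).length = n ∧ _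
      refine ih (tbl.set m _) (by omega) (by simp [hlen]) ?_
      intro k hk1 hk2
      by_cases hke : k = m
      · subst hke
        rw [List.getD_eq_getElem?_getD, List.getElem?_set_self (by omega),
          Option.getD_some]
        refine jumpRight_ok arr n k tbl hn (by omega)
          (fun k' h1 h2 => hval k' (by omega) h2)
          (n - k) ((k : Int) + 1) (by omega) (by omega) (by simp; omega) (by intro k' h1 h2; omega)
      · rw [List.getD_eq_getElem?_getD, List.getElem?_set_ne (by omega),
          ← List.getD_eq_getElem?_getD]
        exact hval k (by omega) hk2

lemma B_eq_spec (arr : List Int) :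
    monotonic_increasing_alt arr
      = ((List.range arr.length).map (leftSpec arr), (List.range arr.length).map (rightSpec arr)) := by
  rcases buildLeft_spec arr arr.length (by omega) with ⟨hllen, hlval⟩
  rcases buildRight_spec arr arr.length rfl arr.length (List.replicate arr.length (arr.length : Int))
    (by omega) (by simp) (by omega) with ⟨hrlen, hrval⟩
  rw [monotonic_increasing_alt]
  refine Prod.ext ?_ ?_
  · refine List.ext_getElem (by simp [hllen]) ?_
    intro i hi1 hi2
    have hin : i < arr.length := by simpa [hllen] using hi1
    rw [List.getElem_map, List.getElem_map, List.getElem_range]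
    have hgd : (buildLeft arr arr.length)[i]'(by omega) = idxL arr i := by
      rw [← hlval i hin, List.getD_eq_getElem?_getD, List.getElem?_eq_getElem (by omega)]
      rfl
    rw [hgd]
    have := firstLt_idxLF arr (gv arr i) i (by omega)
    rw [idxL]
    rw [show leftSpec arr i = firstLt (gv arr i) ((arr.take i).reverse) from rfl, this]
    rfl
  · refine List.ext_getElem (by simp [hrlen]) ?_
    intro i hi1 hi2
    have hin : i < arr.length := by simpa [hrlen] using hi1
    rw [List.getElem_map, List.getElem_map, List.getElem_range]
    have hgd : (buildRight arr arr.length arr.length (List.replicate arr.length (arr.length : Int)))[i]'(by omega)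
        = idxR arr arr.length i := by
      rw [← hrval i hin, List.getD_eq_getElem?_getD, List.getElem?_eq_getElem (by omega)]
      rfl
    rw [hgd]
    have := firstLe_idxRF arr (gv arr i) (arr.length - (i + 1)) (i + 1) (by omega)
    rw [idxR]
    rw [show rightSpec arr i = firstLe (gv arr i) (arr.drop (i + 1)) from rfl, this]
    rfl

-- ===== VERDICT (by name: the statement is the Claim_ definition above) =====
theorem monotonic_increasing_spec : Claim_equal_monotonic_increasing := by
  intro arr _
  show monotonic_increasing arr = monotonic_increasing_alt arr
  rw [A_eq_spec, B_eq_spec]
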